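-- pv_equiv track=rewrite | github.com/chuanshuogushi/HumanDreamer | giga-models/giga_models/pipelines/vision/keypoints/pipeline_dwpose.py | _union_vis_indexes
-- ===== SOURCE A (Python) =====
-- def _union_vis_indexes(indexes_list):
--     vis_indexes = [False] * len(indexes_list[0])
--     for idx in range(len(vis_indexes)):
--         for i in range(len(indexes_list)):
--             if indexes_list[i][idx]:
--                 vis_indexes[idx] = True
--                 break
--     return vis_indexes
-- ===== SOURCE B (Python) =====
-- def _union_vis_indexes(indexes_list):
--     result = [bool(x) for x in indexes_list[0]]
--     for sub in indexes_list[1:]: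
--         for i in range(len(result)):
--             result[i] = result[i] or bool(sub[i])
--     return result
-- ===== Notes on version B (the rewrite author's own statement) =====
-- stated objective: alternative
-- what changed: B replaces A's position-major scan (for each position, inner scan over all lists with a break) by a list-major reduction: start from the first list and fold each remaining list into the accumulator with element-wise or.
import Mathlib
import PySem

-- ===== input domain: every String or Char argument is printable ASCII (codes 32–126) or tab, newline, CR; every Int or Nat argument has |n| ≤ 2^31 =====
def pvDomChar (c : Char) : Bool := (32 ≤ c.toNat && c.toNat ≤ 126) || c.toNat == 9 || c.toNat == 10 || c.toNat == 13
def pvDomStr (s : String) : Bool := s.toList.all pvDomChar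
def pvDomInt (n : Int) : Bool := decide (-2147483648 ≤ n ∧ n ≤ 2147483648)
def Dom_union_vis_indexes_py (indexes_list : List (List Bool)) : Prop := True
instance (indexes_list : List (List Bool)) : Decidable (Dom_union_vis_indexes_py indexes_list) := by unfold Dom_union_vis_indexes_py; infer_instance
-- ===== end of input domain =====

-- B replaces A's position-major scan-with-break by a list-major fold of each remaining
-- list into an accumulator initialised from the first list (objective: alternative).

-- ===== PORT A =====
-- inner loop 'for i in range(len(indexes_list)): if indexes_list[i][idx]: …; break'
-- (returns whether the break fired, i.e. whether vis_indexes[idx] was set to True)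
def innerA (indexes_list : List (List Bool)) (idx : Nat) : List Nat → Bool
  | [] => false
  | i :: rest =>
      if (indexes_list.getD i []).getD idx false then true
      else innerA indexes_list idx rest

def union_vis_indexes_py (indexes_list : List (List Bool)) : List Bool :=
  -- vis_indexes = [False] * len(indexes_list[0])
  let n := (PySem.List.pyGetD indexes_list 0 []).length
  -- for idx in range(len(vis_indexes)): inner loop, setting vis_indexes[idx] = True on break
  (List.range n).foldl
    (fun vis idx =>
      if innerA indexes_list idx (List.range indexes_list.length) then vis.set idx true
      else vis)
    (List.replicate n false)

-- ===== PORT B =====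
def union_vis_indexes_py_alt (indexes_list : List (List Bool)) : List Bool :=
  -- result = [bool(x) for x in indexes_list[0]]  (identity on Bool)
  -- for sub in indexes_list[1:]: for i in range(len(result)): result[i] = result[i] or sub[i]
  (PySem.List.slice indexes_list (some 1) none).foldl
    (fun result sub =>
      (List.range result.length).foldl
        (fun r i => r.set i (r.getD i false || sub.getD i false)) result)
    (PySem.List.pyGetD indexes_list 0 [])

-- ===== PRECONDITION & SPEC =====
-- Pre_ excludes exactly the raising inputs (both A and B raise IndexError on the same
-- set): an empty outer list, or some position idx < len(indexes_list[0]) and sublist i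
-- with idx out of range for sublist i and no earlier sublist True at idx (an earlier
-- True makes A break / B short-circuit `or`, so the out-of-range read never happens).
def Pre_union_vis_indexes_py (indexes_list : List (List Bool)) : Prop :=
  indexes_list ≠ [] ∧
  ∀ idx < (PySem.List.pyGetD indexes_list 0 []).length, ∀ i < indexes_list.length,
    idx < (indexes_list.getD i []).length ∨
    ∃ j < i, idx < (indexes_list.getD j []).length ∧ (indexes_list.getD j []).getD idx false = true
instance (indexes_list : List (List Bool)) : Decidable (Pre_union_vis_indexes_py indexes_list) := by
  unfold Pre_union_vis_indexes_py; infer_instance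
def pvWitness_union_vis_indexes_py : List (List Bool) := [[true, false], [false, true]]

def Spec_union_vis_indexes_py (indexes_list : List (List Bool)) (out : List Bool) : Prop := out = union_vis_indexes_py_alt indexes_list
instance (indexes_list : List (List Bool)) (out : List Bool) : Decidable (Spec_union_vis_indexes_py indexes_list out) := by unfold Spec_union_vis_indexes_py; infer_instance

-- ===== CLAIM (what is proved, stated in full; the proofs are below) =====
def Claim_equal_union_vis_indexes_py : Prop := ∀ (indexes_list : List (List Bool)), Dom_union_vis_indexes_py indexes_list → Pre_union_vis_indexes_py indexes_list → Spec_union_vis_indexes_py indexes_list (union_vis_indexes_py indexes_list)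

-- ===== LEMMAS AND PROOFS =====

theorem foldl_set_length {α : Type} (g : List Bool → α → List Bool)
    (h : ∀ r a, (g r a).length = r.length) :
    ∀ (l : List α) (r : List Bool), (l.foldl g r).length = r.length := by
  intro l
  induction l with
  | nil => intro r; rfl
  | cons a t ih => intro r; simp [List.foldl_cons, ih, h]

theorem innerA_eq_any (xs : List (List Bool)) (idx : Nat) :
    ∀ (is : List Nat), innerA xs idx is = is.any (fun i => (xs.getD i []).getD idx false) := by
  intro is
  induction is with
  | nil => rfl
  | cons i rest ih =>
    by_cases h : (xs.getD i []).getD idx false <;> simp [innerA, h, ih]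

theorem any_range_getD (xs : List (List Bool)) (g : List Bool → Bool) :
    (List.range xs.length).any (fun i => g (xs.getD i [])) = xs.any g := by
  induction xs with
  | nil => rfl
  | cons h t ih =>
    simp only [List.length_cons, List.range_succ_eq_map, List.any_cons, List.any_map]
    have hcomp : ((fun i => g ((h :: t).getD i [])) ∘ Nat.succ) =
        (fun i => g (t.getD i [])) := by
      funext i; simp
    rw [hcomp, ih]
    simp

-- A's fold over range n: element j of the result
theorem foldA_getElem? (p : Nat → Bool) :
    ∀ (idxs : List Nat) (vis : List Bool) (j : Nat),
      (idxs.foldl (fun v i => if p i then v.set i true else v) vis)[j]? =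
        if j ∈ idxs ∧ p j ∧ j < vis.length then some true else vis[j]? := by
  intro idxs
  induction idxs with
  | nil => intro vis j; simp
  | cons i rest ih =>
    intro vis j
    simp only [List.foldl_cons]
    rw [ih]
    by_cases hp : p i
    · simp only [hp, if_pos]
      simp only [List.length_set, List.mem_cons, List.getElem?_set]
      split_ifs <;> simp_all
    · simp only [hp, Bool.false_eq_true, if_neg, not_false_iff, List.mem_cons]
      by_cases hj : j = i
      · subst hj; simp [hp]
      · simp [hj]

-- B's inner index loop: element j of the merged result
theorem mergeB_getElem? (sub : List Bool) :
    ∀ (idxs : List Nat), idxs.Nodup →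
      ∀ (r : List Bool) (j : Nat),
        (idxs.foldl (fun r i => r.set i (r.getD i false || sub.getD i false)) r)[j]? =
          if j ∈ idxs ∧ j < r.length then some (r.getD j false || sub.getD j false) else r[j]? := by
  intro idxs
  induction idxs with
  | nil => intro _ r j; simp
  | cons i rest ih =>
    intro hnd r j
    rcases List.nodup_cons.mp hnd with ⟨hnotin, hndr⟩
    simp only [List.foldl_cons]
    rw [ih hndr]
    simp only [List.length_set, List.mem_cons, List.getD_eq_getElem?_getD, List.getElem?_set]
    by_cases hj : j = i
    · subst hj
      have : j ∉ rest := hnotin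
      split_ifs <;> simp_all
    · split_ifs <;> simp_all

-- B's outer fold over the remaining lists: element j of the result
theorem foldB_getElem? :
    ∀ (ts : List (List Bool)) (acc : List Bool) (j : Nat),
      (ts.foldl
          (fun result sub =>
            (List.range result.length).foldl
              (fun r i => r.set i (r.getD i false || sub.getD i false)) result)
          acc)[j]? =
        if j < acc.length then some (acc.getD j false || ts.any (fun l => l.getD j false))
        else acc[j]? := by
  intro ts
  induction ts with
  | nil =>
    intro acc j
    by_cases hl : j < acc.length
    · simp [hl, List.getD_eq_getElem?_getD, List.getElem?_eq_getElem hl]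
    · simp [hl]
  | cons t ts ih =>
    intro acc j
    simp only [List.foldl_cons]
    rw [ih]
    have hmlen : ((List.range acc.length).foldl
        (fun r i => r.set i (r.getD i false || t.getD i false)) acc).length = acc.length := by
      exact foldl_set_length _ (by simp) _ _
    have hme := mergeB_getElem? t (List.range acc.length) (List.nodup_range) acc j
    rw [hmlen]
    by_cases hl : j < acc.length
    · rw [if_pos hl, if_pos hl]
      have hmj : ((List.range acc.length).foldl
          (fun r i => r.set i (r.getD i false || t.getD i false)) acc).getD j false =
          (acc.getD j false || t.getD j false) := by
        rw [List.getD_eq_getElem?_getD, hme, if_pos ⟨List.mem_range.mpr hl, hl⟩]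
        rfl
      rw [hmj, List.any_cons, Bool.or_assoc]
    · rw [if_neg hl, if_neg hl, hme, if_neg (by simp [hl])]

theorem union_vis_eq (xs : List (List Bool)) :
    union_vis_indexes_py xs = union_vis_indexes_py_alt xs := by
  cases xs with
  | nil => rfl
  | cons h t =>
    apply List.ext_getElem?
    intro j
    have hslice : PySem.List.slice (h :: t) (some 1) none = t := by
      simp [PySem.List.slice_from_one]
    have hhead : PySem.List.pyGetD (h :: t) 0 ([] : List Bool) = h := by
      simp [PySem.List.pyGetD_zero_cons]
    -- A's side
    have hA : (union_vis_indexes_py (h :: t))[j]? =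
        if j ∈ List.range h.length ∧
            innerA (h :: t) j (List.range (h :: t).length) ∧
            j < (List.replicate h.length false).length
        then some true else (List.replicate h.length false)[j]? := by
      simp only [union_vis_indexes_py, hhead]
      exact foldA_getElem? _ _ _ _
    rw [hA]
    -- B's side
    have hB : (union_vis_indexes_py_alt (h :: t))[j]? =
        if j < h.length then some (h.getD j false || t.any (fun l => l.getD j false))
        else h[j]? := by
      simp only [union_vis_indexes_py_alt, hslice, hhead]
      exact foldB_getElem? _ _ _
    rw [hB]
    have hany : innerA (h :: t) j (List.range (h :: t).length) =
        (h :: t).any (fun l => l.getD j false) := by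
      rw [innerA_eq_any]
      exact any_range_getD (h :: t) (fun l => l.getD j false)
    by_cases hl : j < h.length
    · rw [if_pos hl]
      have hcond : (j ∈ List.range h.length ∧
          innerA (h :: t) j (List.range (h :: t).length) = true ∧
          j < (List.replicate h.length false).length) ↔
          ((h.getD j false || t.any fun l => l.getD j false) = true) := by
        rw [hany]; simp [hl, List.any_cons]
      rw [if_congr hcond rfl rfl, List.getElem?_replicate, if_pos hl]
      cases hb : (h.getD j false || t.any fun l => l.getD j false) <;> simp
    · simp [List.mem_range, hl, List.getElem?_replicate, List.getElem?_eq_none (by omega : h.length ≤ j)]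

-- ===== VERDICT (by name: the statement is the Claim_ definition above) =====
theorem union_vis_indexes_py_spec : Claim_equal_union_vis_indexes_py := by
  intro xs _ _
  unfold Spec_union_vis_indexes_py
  exact union_vis_eq xs
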